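-- pv_equiv track=rewrite | github.com/Panosso/estudos | python/challenges/integer_number_miss_done/main.py | solution
-- ===== SOURCE A (Python) =====
-- def solution(A):
--
--     A = sorted(list(set(A)))
--
--     expect_value = 0
--
--     if max(A) <= 0:
--         return 1
--
--     elif len(A) == 1:
--         return A[0] + 1
--
--     for i in range(0, len(A)):
--
--         if A[i] > 0:
--
--             expect_value = A[i] + 1
--
--             if i < len(A)-1:
--
--                 if expect_value != A[i+1]:
--                     return expect_value
--
--             else:
--                 return A[i] + 1
-- ===== SOURCE B (Python) =====
-- def solution(A):
--     s = set(A)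
--     if all(x <= 0 for x in s):
--         return 1
--     v = min(x for x in s if x > 0)
--     while v + 1 in s:
--         v += 1
--     return v + 1
-- ===== Notes on version B (the rewrite author's own statement) =====
-- stated objective: faster
-- what changed: Instead of sorting the deduplicated values and scanning the sorted list for the first gap after a positive element, B keeps the values in a hash set, takes the smallest positive element and walks v, v+1, v+2, ... by set membership until the first missing value.
-- outside the precondition, e.g. on solution([]): A raises ValueError, B returns 1
import Mathlib
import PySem

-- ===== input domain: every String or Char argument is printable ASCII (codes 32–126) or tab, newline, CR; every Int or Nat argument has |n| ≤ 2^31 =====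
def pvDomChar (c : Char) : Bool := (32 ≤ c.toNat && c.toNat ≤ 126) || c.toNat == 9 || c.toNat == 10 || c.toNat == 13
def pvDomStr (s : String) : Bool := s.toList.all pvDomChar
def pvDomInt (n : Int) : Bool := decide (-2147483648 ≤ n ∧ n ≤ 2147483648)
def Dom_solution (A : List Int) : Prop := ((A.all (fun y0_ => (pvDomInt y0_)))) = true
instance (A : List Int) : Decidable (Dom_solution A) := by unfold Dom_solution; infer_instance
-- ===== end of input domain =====

-- B replaces A's sort-and-scan with a set-membership walk from the smallest positive value.
-- A raises ValueError on the empty list (max of an empty sequence); Pre_ excludes exactly that input.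

-- ===== PORT A =====
-- A's for-loop over indices with the A[i+1] lookahead, as the obvious structural
-- recursion over the sorted list (next element = head of the tail); 0 at exhaustion
-- is unreachable under Pre_ (Python would return None there).
def solLoop : List Int → Int
  | [] => 0
  | a :: rest =>
    if a > 0 then
      match rest with
      | [] => a + 1
      | b :: _ => if a + 1 ≠ b then a + 1 else solLoop rest
    else solLoop rest

-- the body of A after 'A = sorted(list(set(A)))'
def solAfter (L : List Int) : Int :=
  match PySem.List.max? L (fun x => x) with
  | none => 0  -- max([]) raises ValueError in Python; excluded by Pre_
  | some m =>
    if m ≤ 0 then 1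
    else if L.length = 1 then (PySem.List.pyGet? L 0).getD 0 + 1
    else solLoop L

def solution (A : List Int) : Int :=
  solAfter (PySem.List.sorted (PySem.Set.ofList A) (fun x => x) false)

-- ===== PORT B =====
-- termination helpers for the while-walk: the elements of s above v strictly shrink
lemma pvFilterLe (v : Int) (t : List Int) :
    (t.filter (fun x => decide (v + 1 < x))).length ≤ (t.filter (fun x => decide (v < x))).length :=
  List.Sublist.length_le (List.monotone_filter_right t (fun a ha => by
    simp only [decide_eq_true_eq] at *; omega))

lemma pvFilterLt {s : List Int} {v : Int} (h : (v + 1) ∈ s) :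
    (s.filter (fun x => decide (v + 1 < x))).length < (s.filter (fun x => decide (v < x))).length := by
  induction s with
  | nil => cases h
  | cons x t ih =>
    simp only [List.filter_cons]
    rcases List.mem_cons.mp h with hx | hx
    · subst hx
      rw [if_neg (by simp), if_pos (by simp)]
      simp only [List.length_cons]
      exact Nat.lt_succ_of_le (pvFilterLe v t)
    · have hlt := ih hx
      by_cases h1 : v + 1 < x
      · rw [if_pos (by simpa using h1), if_pos (by simp only [decide_eq_true_eq]; omega)]
        simp only [List.length_cons]
        omega
      · rw [if_neg (by simpa using h1)]
        by_cases h2 : v < x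
        · rw [if_pos (by simpa using h2)]
          simp only [List.length_cons]
          omega
        · rw [if_neg (by simpa using h2)]
          exact hlt

-- the 'while v + 1 in s: v += 1' loop
def walkB (s : List Int) (v : Int) : Int :=
  if h : (v + 1) ∈ s then walkB s (v + 1) else v + 1
termination_by (s.filter (fun x => decide (v < x))).length
decreasing_by exact pvFilterLt h

-- the body of B after 's = set(A)'
def walkFrom (s : List Int) : Int :=
  if s.all (fun x => decide (x ≤ 0)) then 1
  else
    match PySem.List.min? (s.filter (fun x => decide (0 < x))) (fun x => x) with
    | none => 0  -- unreachable: the all-check failed, so a positive element exists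
    | some v => walkB s v

def solution_alt (A : List Int) : Int :=
  walkFrom (PySem.Set.ofList A)

-- ===== PRECONDITION & SPEC =====
-- A raises ValueError on [] (max of an empty sequence); that is the only input it raises on.
def Pre_solution (A : List Int) : Prop := A ≠ []
instance (A : List Int) : Decidable (Pre_solution A) := by unfold Pre_solution; infer_instance
def pvWitness_solution : List Int := ([1, 2, 4])

def Spec_solution (A : List Int) (out : Int) : Prop := out = solution_alt A
instance (A : List Int) (out : Int) : Decidable (Spec_solution A out) := by unfold Spec_solution; infer_instance

-- ===== CLAIM (what is proved, stated in full; the proofs are below) =====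
def Claim_equal_solution : Prop := ∀ (A : List Int), Dom_solution A → Pre_solution A → Spec_solution A (solution A)

-- ===== LEMMAS AND PROOFS =====

lemma walkB_unfold (s : List Int) (v : Int) :
    walkB s v = if (v + 1) ∈ s then walkB s (v + 1) else v + 1 := by
  rw [walkB]; split <;> simp_all

-- A's gap scan over a strictly increasing list L equals B's membership walk from the
-- smallest positive element p, provided s and L have the same members above p.
lemma loop_eq_walk (s : List Int) :
    ∀ (L : List Int) (p : Int),
      L.Pairwise (· < ·) →
      (∀ w : Int, p < w → (w ∈ s ↔ w ∈ L)) →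
      0 < p → p ∈ L → (∀ y ∈ L, 0 < y → p ≤ y) →
      solLoop L = walkB s p := by
  intro L
  induction L with
  | nil => intro p _ _ _ hpL _; cases hpL
  | cons a t ih =>
    intro p hpw hmem hp hpL hmin
    by_cases ha : a > 0
    · -- a is the least positive element of a :: t, so p = a
      have hpa : p = a := by
        have h1 : p ≤ a := hmin a (List.mem_cons_self) ha
        rcases List.mem_cons.mp hpL with h | h
        · exact h
        · exact absurd (List.rel_of_pairwise_cons hpw h) (by omega)
      subst hpa
      cases t with
      | nil =>
        -- last element: A returns p + 1; p + 1 is not in s, so B stops at p + 1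
        have hnot : (p + 1) ∉ s := by
          intro hmem'
          have h1 := (hmem (p + 1) (by omega)).mp hmem'
          simp only [List.mem_singleton] at h1
          omega
        rw [walkB_unfold, if_neg hnot]
        simp [solLoop, ha]
      | cons b t' =>
        have hab : p < b := List.rel_of_pairwise_cons hpw (List.mem_cons_self)
        by_cases hne : p + 1 ≠ b
        · -- gap found: both return p + 1
          have hnot : (p + 1) ∉ s := by
            intro hmem'
            have h1 := (hmem (p + 1) (by omega)).mp hmem'
            rcases List.mem_cons.mp h1 with h | h
            · omega
            · rcases List.mem_cons.mp h with h | h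
              · exact hne h
              · have := List.rel_of_pairwise_cons hpw.of_cons h
                omega
          rw [walkB_unfold, if_neg hnot]
          simp [solLoop, ha, hne]
        · -- p + 1 = b: A advances to the next element, B walks one step
          rw [not_ne_iff] at hne
          have hbmem : (p + 1) ∈ s := by
            refine (hmem (p + 1) (by omega)).mpr ?_
            rw [hne]
            exact List.mem_cons_of_mem _ (List.mem_cons_self)
          have hstep : walkB s p = walkB s b := by
            rw [walkB_unfold, if_pos hbmem, hne]
          have hrec : solLoop (b :: t') = walkB s b := by
            apply ih b hpw.of_cons
            · intro w hw
              rw [hmem w (by omega)]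
              constructor
              · intro h
                rcases List.mem_cons.mp h with h | h
                · omega
                · exact h
              · exact List.mem_cons_of_mem _
            · omega
            · exact List.mem_cons_self
            · intro y hy _
              rcases List.mem_cons.mp hy with h | h
              · omega
              · have := List.rel_of_pairwise_cons hpw.of_cons h
                omega
          have hskip : solLoop (p :: b :: t') = solLoop (b :: t') := by
            simp [solLoop, ha, hne]
          rw [hskip, hrec, hstep]
    · -- a ≤ 0: A skips it; it is irrelevant to B's walk (which stays above p > 0)
      rw [not_lt] at ha
      have hpt : p ∈ t := by
        rcases List.mem_cons.mp hpL with h | h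
        · omega
        · exact h
      have hskip : solLoop (a :: t) = solLoop t := by
        cases t with
        | nil => cases hpt
        | cons b t' => simp [solLoop, show ¬ a > 0 by omega]
      rw [hskip]
      apply ih p hpw.of_cons
      · intro w hw
        rw [hmem w hw]
        constructor
        · intro h
          rcases List.mem_cons.mp h with h | h
          · omega
          · exact h
        · exact List.mem_cons_of_mem _
      · exact hp
      · exact hpt
      · intro y hy hy0
        exact hmin y (List.mem_cons_of_mem _ hy) hy0

theorem solution_spec_aux : ∀ (A : List Int), A ≠ [] → solution A = solution_alt A := by
  intro A hA
  unfold solution solution_alt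
  set s := PySem.Set.ofList A with hs
  set L := PySem.List.sorted s (fun x => x) false with hL
  have hmemsL : ∀ x : Int, x ∈ s ↔ x ∈ L := by
    intro x
    rw [hL, PySem.List.mem_sorted]
  have hLne : L ≠ [] := by
    intro h
    obtain ⟨a, rest, rfl⟩ : ∃ a rest, A = a :: rest := by
      cases A with
      | nil => exact absurd rfl hA
      | cons a rest => exact ⟨a, rest, rfl⟩
    have ha : a ∈ L := by
      rw [← hmemsL, hs, PySem.Set.mem_ofList]
      exact List.mem_cons_self
    rw [h] at ha
    cases ha
  obtain ⟨m, hm⟩ : ∃ m, PySem.List.max? L (fun x => x) = some m := by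
    cases hmx : PySem.List.max? L (fun x => x) with
    | none => exact absurd ((PySem.List.max?_eq_none_iff L (fun x => x)).mp hmx) hLne
    | some m => exact ⟨m, rfl⟩
  have hmL : m ∈ L := PySem.List.max?_mem hm
  have hmax : ∀ y ∈ L, y ≤ m := fun y hy => PySem.List.max?_isMax hm y hy
  unfold solAfter walkFrom
  rw [hm]
  show (if m ≤ 0 then 1 else if L.length = 1 then (PySem.List.pyGet? L 0).getD 0 + 1 else solLoop L) = _
  by_cases hm0 : m ≤ 0
  · -- all elements nonpositive: both return 1
    have hall : (s.all fun x => decide (x ≤ 0)) = true := by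
      rw [List.all_eq_true]
      intro x hx
      have := hmax x ((hmemsL x).mp hx)
      simp only [decide_eq_true_eq]
      omega
    rw [if_pos hm0, hall]
    simp
  · have hallf : (s.all fun x => decide (x ≤ 0)) = false := by
      rw [Bool.eq_false_iff]
      intro hall
      have := List.all_eq_true.mp hall m ((hmemsL m).mpr hmL)
      simp only [decide_eq_true_eq] at this
      omega
    rw [if_neg hm0, hallf]
    simp only [Bool.false_eq_true, if_false]
    obtain ⟨p, hp⟩ : ∃ p, PySem.List.min? (s.filter (fun x => decide (0 < x))) (fun x => x) = some p := by
      cases hmn : PySem.List.min? (s.filter (fun x => decide (0 < x))) (fun x => x) with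
      | none =>
        have hnil := (PySem.List.min?_eq_none_iff (s.filter (fun x => decide (0 < x))) (fun x => x)).mp hmn
        have hmf : m ∈ s.filter (fun x => decide (0 < x)) := by
          rw [List.mem_filter]
          refine ⟨(hmemsL m).mpr hmL, by simp only [decide_eq_true_eq]; omega⟩
        rw [hnil] at hmf
        cases hmf
      | some p => exact ⟨p, rfl⟩
    rw [hp]
    show _ = walkB s p
    have hpmem := PySem.List.min?_mem hp
    rw [List.mem_filter] at hpmem
    have hp0 : 0 < p := of_decide_eq_true hpmem.2
    have hpL : p ∈ L := (hmemsL p).mp hpmem.1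
    have hpmin : ∀ y ∈ L, 0 < y → p ≤ y := by
      intro y hy hy0
      exact PySem.List.min?_isMin hp y
        (List.mem_filter.mpr ⟨(hmemsL y).mpr hy, by simp only [decide_eq_true_eq]; omega⟩)
    have hpw : L.Pairwise (· < ·) := by
      rw [hL, hs]
      exact PySem.List.sorted_ofList_pairwise_lt A
    have hwalk : solLoop L = walkB s p :=
      loop_eq_walk s L p hpw (fun w _ => hmemsL w) hp0 hpL hpmin
    by_cases hlen : L.length = 1
    · -- singleton branch of A: L = [x] with x = p, and p + 1 is not in s
      obtain ⟨x, hx⟩ : ∃ x, L = [x] := by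
        cases hcl : L with
        | nil => rw [hcl] at hlen; simp at hlen
        | cons a tl =>
          cases tl with
          | nil => exact ⟨a, rfl⟩
          | cons b tl' => rw [hcl] at hlen; simp at hlen
      have hpx : p = x := by
        have h1 := hpL
        rw [hx, List.mem_singleton] at h1
        exact h1
      have hnot : (x + 1) ∉ s := by
        intro hmem'
        have h1 := (hmemsL (x + 1)).mp hmem'
        rw [hx, List.mem_singleton] at h1
        omega
      rw [if_pos hlen, hx, hpx, walkB_unfold, if_neg hnot]
      simp [PySem.List.pyGet?, PySem.List.pyIdx?]
    · rw [if_neg hlen]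
      exact hwalk

-- ===== VERDICT (by name: the statement is the Claim_ definition above) =====
theorem solution_spec : Claim_equal_solution := by
  intro A _ hpre
  unfold Spec_solution
  exact solution_spec_aux A hpre
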